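-- pv_equiv track=rewrite | github.com/salmiyounes/coding-challenges | adventofcode/2015/2015_day_13/sol.py | count_family
-- ===== SOURCE A (Python) =====
-- from typing import List, Dict, Set
--
-- def count_family(data: List[str]) -> int:
-- 	count: int = 0
-- 	isHere: Set[str] = set()
-- 	for d in data:
-- 		name: str = d.split(' ')[0]
-- 		if name not in isHere:
-- 			count += 1
-- 			isHere.add(name)
-- 		else:
-- 			continue
-- 	return count
-- ===== SOURCE B (Python) =====
-- def count_family(data):
--     names = sorted(d.split(' ')[0] for d in data)
--     if not names:
--         return 0
--     return 1 + sum(1 for a, b in zip(names, names[1:]) if a != b)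
-- ===== Notes on version B (the rewrite author's own statement) =====
-- stated objective: alternative
-- what changed: Replaces the running membership set with sort-then-adjacent-scan: extract all first words, sort them, and return 1 plus the number of adjacent pairs that differ (0 for empty input).
import Mathlib
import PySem

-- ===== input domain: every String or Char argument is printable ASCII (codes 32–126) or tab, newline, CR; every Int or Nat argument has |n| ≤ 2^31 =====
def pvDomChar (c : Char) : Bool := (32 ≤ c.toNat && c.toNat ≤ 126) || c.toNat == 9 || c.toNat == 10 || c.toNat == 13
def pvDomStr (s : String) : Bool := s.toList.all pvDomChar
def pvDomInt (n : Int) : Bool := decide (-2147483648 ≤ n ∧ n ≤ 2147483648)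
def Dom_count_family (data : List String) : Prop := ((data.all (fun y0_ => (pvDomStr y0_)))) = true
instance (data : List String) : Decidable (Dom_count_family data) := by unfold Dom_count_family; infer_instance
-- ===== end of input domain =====

-- B replaces A's running membership set (one stateful pass) by sort-then-adjacent-scan:
-- collect the first words, sort them, return 1 + the number of adjacent differing pairs
-- (0 for empty input) — an alternative algorithm of similar cost.

-- d.split(' ')[0]: split? with the nonempty separator " " always returns some nonempty
-- list of pieces, so the [0]-indexing is exactly its head (never none, never an IndexError).
def pvFirstWord (d : String) : String := ((PySem.Str.split? d " ").getD []).headD ""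

-- ===== PORT A =====
-- loop body of A: if name not in isHere: count += 1; isHere.add(name)
def pvStepA (st : Int × PySem.Set String) (name : String) : Int × PySem.Set String :=
  if !PySem.Set.contains st.2 name then (st.1 + 1, PySem.Set.add st.2 name) else st

def count_family (data : List String) : Int :=
  (data.foldl (fun st d => pvStepA st (pvFirstWord d))
    ((0 : Int), (PySem.Set.empty : PySem.Set String))).1

-- ===== PORT B =====
-- names[1:] is names.drop 1 (slice from 1 on a list); sum(1 for … if a != b) is countP
-- over zip(names, names[1:]); both exact on lists.
def count_family_alt (data : List String) : Int :=
  let names := PySem.List.sorted (data.map pvFirstWord) (fun x => x) false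
  match names with
  | [] => 0
  | _ :: _ => 1 + ((names.zip (names.drop 1)).countP (fun p => p.1 != p.2) : Int)

-- ===== PRECONDITION & SPEC =====
def Spec_count_family (data : List String) (out : Int) : Prop := out = count_family_alt data
instance (data : List String) (out : Int) : Decidable (Spec_count_family data out) := by unfold Spec_count_family; infer_instance

-- ===== CLAIM (what is proved, stated in full; the proofs are below) =====
def Claim_equal_count_family : Prop := ∀ (data : List String), Dom_count_family data → Spec_count_family data (count_family data)

-- ===== LEMMAS AND PROOFS =====

-- A's loop: the final count equals the growth in size of the membership set.
theorem pvA_inv (ns : List String) (c : Int) (s : PySem.Set String) :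
    ns.foldl pvStepA (c, s)
      = (c + ((ns.foldl PySem.Set.add s).length : Int) - (s.length : Int),
         ns.foldl PySem.Set.add s) := by
  induction ns generalizing c s with
  | nil => simp
  | cons n t ih =>
    by_cases h : n ∈ s
    · have hadd : PySem.Set.add s n = s := by
        simp [PySem.Set.add, PySem.Set.contains, h]
      have hstep : pvStepA (c, s) n = (c, s) := by
        simp [pvStepA, PySem.Set.contains, h]
      rw [List.foldl_cons, List.foldl_cons, hstep, hadd, ih]
    · have hadd : PySem.Set.add s n = s ++ [n] := by
        simp [PySem.Set.add, PySem.Set.contains, h]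
      have hstep : pvStepA (c, s) n = (c + 1, PySem.Set.add s n) := by
        simp [pvStepA, PySem.Set.contains, h]
      rw [List.foldl_cons, List.foldl_cons, hstep, ih]
      have hlen : (PySem.Set.add s n).length = s.length + 1 := by simp [hadd]
      rw [hlen]
      congr 1
      push_cast
      ring

-- B's adjacent scan on a sorted nonempty list: 1 + #{differing adjacent pairs} = #distinct.
theorem pvB_adj (t : List String) (m : String) (hp : (m :: t).Pairwise (· ≤ ·)) :
    1 + ((((m :: t).zip t).countP (fun p => p.1 != p.2)) : Int)
      = ((m :: t).toFinset.card : Int) := by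
  induction t generalizing m with
  | nil => simp
  | cons n t' ih =>
    have hcons : (m :: n :: t').zip (n :: t') = (m, n) :: (n :: t').zip t' := rfl
    have hn : ∀ x ∈ t', n ≤ x := fun x hx => List.rel_of_pairwise_cons hp.tail hx
    have hih := ih n hp.tail
    by_cases hmn : m = n
    · subst hmn
      have hts : (m :: m :: t').toFinset = (m :: t').toFinset := by
        simp [List.toFinset_cons]
      rw [hcons, List.countP_cons, hts]
      simpa using hih
    · have hmlt : m < n :=
        lt_of_le_of_ne (List.rel_of_pairwise_cons hp (List.mem_cons_self ..)) hmn
      have hmnot : m ∉ (n :: t').toFinset := by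
        simp only [List.toFinset_cons, Finset.mem_insert, List.mem_toFinset]
        rintro (rfl | hx)
        · exact hmn rfl
        · exact absurd (hmlt.trans_le (hn m hx)) (lt_irrefl m)
      rw [hcons, List.countP_cons, List.toFinset_cons (a := m),
        Finset.card_insert_of_notMem hmnot]
      simp only [bne_iff_ne, if_pos hmn]
      push_cast at hih ⊢
      omega

-- set(ns) has as many elements as the Finset of names of ns.
theorem pvOfList_length (ns : List String) :
    ((PySem.Set.ofList ns).length : Int) = (ns.toFinset.card : Int) := by
  have hnd : (PySem.Set.ofList ns).Nodup := PySem.Set.nodup_ofList ns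
  have hfs : (PySem.Set.ofList ns).toFinset = ns.toFinset := by
    ext x; simp [PySem.Set.mem_ofList]
  rw [← List.toFinset_card_of_nodup hnd, hfs]

-- ===== VERDICT (by name: the statement is the Claim_ definition above) =====
theorem count_family_spec : Claim_equal_count_family := by
  intro data _
  unfold Spec_count_family count_family count_family_alt
  rw [← List.foldl_map (f := pvFirstWord) (g := pvStepA), pvA_inv]
  have hA : (0 : Int) + ((List.foldl PySem.Set.add PySem.Set.empty (data.map pvFirstWord)).length : Int)
      - ((PySem.Set.empty : PySem.Set String).length : Int)
      = ((data.map pvFirstWord).toFinset.card : Int) := by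
    have h := pvOfList_length (data.map pvFirstWord)
    rw [PySem.Set.ofList_eq_foldl] at h
    simp [PySem.Set.empty, ← h]
  rw [hA]
  have hperm := PySem.List.sorted_perm (data.map pvFirstWord) (fun x => x) false
  have hfs : (PySem.List.sorted (data.map pvFirstWord) (fun x => x) false).toFinset
      = (data.map pvFirstWord).toFinset := List.toFinset_eq_of_perm _ _ hperm
  have hsort : (PySem.List.sorted (data.map pvFirstWord) (fun x => x) false).Pairwise (· ≤ ·) := by
    simpa using PySem.List.sorted_pairwise (data.map pvFirstWord) (fun x => x)
  rw [← hfs]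
  cases hcase : PySem.List.sorted (data.map pvFirstWord) (fun x => x) false with
  | nil => simp
  | cons m t =>
    rw [hcase] at hsort
    simpa using (pvB_adj t m hsort).symm
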